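-- pv_equiv track=rewrite | github.com/Ludovicscelles/python-quests | lesson_12/lesson_12_challenge_02.py | capitalize_certain_vowels_2
-- ===== SOURCE A (Python) =====
-- def capitalize_certain_vowels_2(string):
--   vowels = "aeiouy"
--   result = []
--
--   for index, letter in enumerate(string.lower()):
--     if letter in vowels and index % 2 == 0:
--       result.append(letter.upper())
--     else:
--       result.append(letter)
--
--   return "".join(result)
-- ===== SOURCE B (Python) =====
-- def capitalize_certain_vowels_2(string):
--   vowels = "aeiouy"
--   out = []
--   it = iter(string.lower())
--   for c in it:
--     out.append(c.upper() if c in vowels else c)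
--     d = next(it, None)
--     if d is None:
--       break
--     out.append(d)
--   return "".join(out)
-- ===== Notes on version B (the rewrite author's own statement) =====
-- stated objective: alternative
-- what changed: B drops the index/enumerate bookkeeping entirely: it consumes the lowered characters two at a time (upcase-test the first of each pair, copy the second unchanged), so no index or parity test exists at all.
import Mathlib
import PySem

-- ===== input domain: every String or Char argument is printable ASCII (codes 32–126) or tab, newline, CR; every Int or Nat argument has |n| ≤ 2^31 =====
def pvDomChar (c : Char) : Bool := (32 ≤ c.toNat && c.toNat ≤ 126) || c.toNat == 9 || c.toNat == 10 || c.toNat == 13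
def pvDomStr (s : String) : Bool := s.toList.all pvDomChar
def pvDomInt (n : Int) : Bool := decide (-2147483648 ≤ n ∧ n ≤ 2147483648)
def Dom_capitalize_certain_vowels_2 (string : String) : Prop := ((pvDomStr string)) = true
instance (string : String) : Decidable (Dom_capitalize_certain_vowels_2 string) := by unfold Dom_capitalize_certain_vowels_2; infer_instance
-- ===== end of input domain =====

-- B replaces A's enumerate/index-parity loop by consuming the lowered characters two at a time (alternative decomposition, same cost).


-- ===== PORT A =====
-- 'letter in vowels' on a single character is exactly char membership in the vowel list
def capitalize_certain_vowels_2 (string : String) : String :=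
  let vowels : List Char := "aeiouy".toList
  let result : List Char :=
    (PySem.List.enumerate (PySem.Chars.lower string.toList) 0).foldl
      (fun acc p =>
        if vowels.contains p.2 && (PySem.Int.mod p.1 2 == 0) then
          acc ++ [PySem.Chars.upperChar p.2]
        else
          acc ++ [p.2]) []
  String.ofList result

-- ===== PORT B =====
-- the pairwise for-loop of Source B: first of each pair upcase-tested, second copied; break when next() is exhausted
def pvAltLoop (out chars : List Char) : List Char :=
  match chars with
  | [] => out
  | [c] =>
      out ++ [if ("aeiouy".toList).contains c then PySem.Chars.upperChar c else c]
  | c :: d :: rest =>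
      pvAltLoop
        (out ++ [if ("aeiouy".toList).contains c then PySem.Chars.upperChar c else c] ++ [d])
        rest

def capitalize_certain_vowels_2_alt (string : String) : String :=
  String.ofList (pvAltLoop [] (PySem.Chars.lower string.toList))

-- ===== PRECONDITION & SPEC =====
def Spec_capitalize_certain_vowels_2 (string : String) (out : String) : Prop := out = capitalize_certain_vowels_2_alt string
instance (string : String) (out : String) : Decidable (Spec_capitalize_certain_vowels_2 string out) := by unfold Spec_capitalize_certain_vowels_2; infer_instance

-- ===== CLAIM (what is proved, stated in full; the proofs are below) =====
def Claim_equal_capitalize_certain_vowels_2 : Prop := ∀ (string : String), Dom_capitalize_certain_vowels_2 string → Spec_capitalize_certain_vowels_2 string (capitalize_certain_vowels_2 string)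

-- ===== LEMMAS AND PROOFS =====
-- the per-position value A's loop appends
def pvF (p : Int × Char) : Char :=
  if ("aeiouy".toList).contains p.2 && (PySem.Int.mod p.1 2 == 0) then PySem.Chars.upperChar p.2 else p.2

lemma pvAltLoop_eq (out s : List Char) : ∀ (n : Int), PySem.Int.mod n 2 = 0 →
    pvAltLoop out s = out ++ (PySem.List.enumerate s n).map pvF := by
  induction out, s using pvAltLoop.induct with
  | case1 out => intro n _; simp [pvAltLoop, PySem.List.enumerate_nil]
  | case2 out c =>
    intro n hn
    have h0 : (2:Int) ∣ n := (PySem.Int.mod_eq_zero_iff_dvd n 2).mp hn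
    simp [pvAltLoop, PySem.List.enumerate_cons, PySem.List.enumerate_nil, pvF, h0]
  | case3 out c d rest ih =>
    intro n hn
    have h2 : PySem.Int.mod (n + 2) 2 = 0 := by
      rw [PySem.Int.mod_eq_emod_of_pos (by norm_num)] at hn ⊢; omega
    have h0 : (2:Int) ∣ n := (PySem.Int.mod_eq_zero_iff_dvd n 2).mp hn
    have h1 : ¬ (2:Int) ∣ (n + 1) := by omega
    rw [pvAltLoop, ih (n + 2) h2]
    simp only [PySem.List.enumerate_cons, List.map_cons]
    have he : PySem.List.enumerate rest (n + 1 + 1) = PySem.List.enumerate rest (n + 2) := by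
      ring_nf
    rw [he]
    simp [pvF, h0, h1]

lemma pvFoldA (l : List (Int × Char)) (acc : List Char) :
    l.foldl (fun acc p =>
        if ("aeiouy".toList).contains p.2 && (PySem.Int.mod p.1 2 == 0) then
          acc ++ [PySem.Chars.upperChar p.2]
        else acc ++ [p.2]) acc = acc ++ l.map pvF := by
  have h : (fun (acc : List Char) (p : Int × Char) =>
      if ("aeiouy".toList).contains p.2 && (PySem.Int.mod p.1 2 == 0) then
        acc ++ [PySem.Chars.upperChar p.2]
      else acc ++ [p.2]) = fun acc p => acc ++ [pvF p] := by
    funext acc p; unfold pvF; split_ifs <;> rfl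
  rw [h, PySem.List.foldl_append_singleton_eq_map]

-- ===== VERDICT (by name: the statement is the Claim_ definition above) =====
theorem capitalize_certain_vowels_2_spec : Claim_equal_capitalize_certain_vowels_2 := by
  intro string _
  simp only [Spec_capitalize_certain_vowels_2, capitalize_certain_vowels_2,
    capitalize_certain_vowels_2_alt]
  rw [pvAltLoop_eq [] _ 0 (by decide), pvFoldA]
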